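-- pv_equiv track=rewrite | github.com/SunwoongH/algorithm | Programmers/KakaoBlindRecruitment_2021/신규 아이디 추천.py | solution
-- ===== SOURCE A (Python) =====
-- def solution(new_id):
--     patterns = ['-', '_', '.']
--     answer = list(new_id)
--     #1단계
--     for i in range(len(answer)):
--         if answer[i].isupper():
--             answer[i] = answer[i].lower()
--     #2단계
--     new_answer = []
--     for char in answer:
--         if not char.isalpha() and not char.isdigit() and char not in patterns:
--             continue
--         new_answer.append(char)
--     answer = new_answer
--     #3단계
--     flag = False
--     new_answer = []
--     for char in answer:
--         if not flag:
--             if char == '.':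
--                 flag = True
--                 new_answer.append('.')
--                 continue
--             new_answer.append(char)
--         else:
--             if char != '.':
--                 new_answer.append(char)
--                 flag = False
--     answer = new_answer
--     #4단계
--     if len(answer) > 1:
--         if answer[0] == '.' and answer[-1] == '.':
--             answer = answer[1:len(answer) - 1]
--         else:
--             if answer[0] == '.':
--                 answer = answer[1:len(answer)]
--             elif answer[-1] == '.':
--                 answer = answer[:len(answer) - 1]
--     elif len(answer) == 1 and answer[0] == '.':
--         answer = []
--     #5단계
--     if len(answer) == 0:
--         answer.append('a')
--     #6단계
--     if len(answer) > 15: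
--         answer = answer[:15]
--         if answer[-1] == '.':
--             answer.pop()
--     #7단계
--     if len(answer) <= 2:
--         char = answer[-1]
--         answer.extend([char for _ in range(3 - len(answer))])
--     return ''.join(answer)
-- ===== SOURCE B (Python) =====
-- def solution(new_id):
--     # step 1+2: lowercase, keep only letters/digits/-_.
--     s = ''.join(c for c in new_id.lower()
--                 if c.isalpha() or c.isdigit() or c in '-_.')
--     # steps 3+4 in one: split on '.', drop empty pieces (runs of dots and
--     # boundary dots), rejoin with single dots
--     s = '.'.join(p for p in s.split('.') if p)
--     # step 5
--     if not s:
--         s = 'a'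
--     # step 6
--     if len(s) > 15:
--         s = s[:15]
--         if s.endswith('.'):
--             s = s[:-1]
--     # step 7
--     if len(s) <= 2:
--         s += s[-1] * (3 - len(s))
--     return s
-- ===== Notes on version B (the rewrite author's own statement) =====
-- stated objective: idiomatic
-- what changed: The explicit flag state machine that collapses dot runs plus the four-branch boundary-dot trimming (steps 3-4) are replaced by one split('.')/filter/join pipeline, and the char-level index loops of steps 1-2 become a comprehension over new_id.lower(); the final truncate/pad steps use string slicing instead of list mutation.
import Mathlib
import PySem

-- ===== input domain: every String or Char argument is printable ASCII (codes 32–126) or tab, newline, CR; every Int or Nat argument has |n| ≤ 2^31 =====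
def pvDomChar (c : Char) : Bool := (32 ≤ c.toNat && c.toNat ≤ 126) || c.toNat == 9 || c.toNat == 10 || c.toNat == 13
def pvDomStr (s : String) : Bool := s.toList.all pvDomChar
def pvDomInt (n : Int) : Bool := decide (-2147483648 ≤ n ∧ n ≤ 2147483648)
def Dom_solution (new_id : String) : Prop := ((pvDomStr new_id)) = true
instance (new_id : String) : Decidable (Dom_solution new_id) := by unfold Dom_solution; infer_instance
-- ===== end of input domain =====

-- B replaces A's flag state machine + four-branch boundary-dot trimming (steps 3-4) by one
-- split('.')/filter/join pipeline (idiomatic; same O(n) cost; return value only — A mutates no argument).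

-- loop body of A's 3단계 loop (flag, accumulated list)
def pvStep3 (st : Bool × List Char) (c : Char) : Bool × List Char :=
  if !st.1 then
    if c = '.' then (true, st.2 ++ ['.'])
    else (st.1, st.2 ++ [c])
  else
    if c ≠ '.' then (false, st.2 ++ [c]) else st

-- ===== PORT A =====
def solution (new_id : String) : String :=
  let patterns : List Char := ['-', '_', '.']
  let answer := new_id.toList
  -- 1단계: lower each uppercase char in place
  let answer := answer.map (fun c => if PySem.Chars.isupper c then PySem.Chars.lowerChar c else c)
  -- 2단계
  let answer := answer.foldl
    (fun acc c =>
      if !PySem.Chars.isalpha c && !PySem.Chars.isdigit c && !(patterns.contains c) then acc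
      else acc ++ [c]) []
  -- 3단계
  let st := answer.foldl pvStep3 (false, ([] : List Char))
  let answer := st.2
  -- 4단계 (answer[0] / answer[-1] are only read under len > 1 / len = 1, hence in range)
  let answer :=
    if answer.length > 1 then
      if PySem.List.pyGet? answer 0 = some '.' ∧ PySem.List.pyGet? answer (-1) = some '.' then
        PySem.List.slice answer (some 1) (some ((answer.length : Int) - 1))
      else if PySem.List.pyGet? answer 0 = some '.' then
        PySem.List.slice answer (some 1) (some (answer.length : Int))
      else if PySem.List.pyGet? answer (-1) = some '.' then
        PySem.List.slice answer none (some ((answer.length : Int) - 1))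
      else answer
    else if answer.length = 1 ∧ PySem.List.pyGet? answer 0 = some '.' then []
    else answer
  -- 5단계
  let answer := if answer.length = 0 then answer ++ ['a'] else answer
  -- 6단계
  let answer :=
    if answer.length > 15 then
      let answer := PySem.List.slice answer none (some 15)
      if PySem.List.pyGet? answer (-1) = some '.' then answer.dropLast  -- answer.pop(): nonempty here
      else answer
    else answer
  -- 7단계 (answer nonempty after step 5, so answer[-1] is in range; getD is never the default)
  let answer :=
    if answer.length ≤ 2 then
      let char := (PySem.List.pyGet? answer (-1)).getD 'a'
      answer ++ (PySem.List.pyRange 0 (3 - (answer.length : Int)) 1).map (fun _ => char)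
    else answer
  String.ofList answer

-- ===== PORT B =====
def solution_alt (new_id : String) : String :=
  -- step 1+2: lowercase, keep letters/digits/-_.
  let s := PySem.Chars.lower new_id.toList
  let s := s.filter (fun c =>
    PySem.Chars.isalpha c || PySem.Chars.isdigit c || PySem.Chars.isIn [c] ['-', '_', '.'])
  -- steps 3+4 in one: split on '.', drop empty pieces, rejoin with single dots
  let s := PySem.Chars.join ['.'] ((PySem.Chars.splitOn s ['.']).filter (fun p => !p.isEmpty))
  -- step 5
  let s := if s.isEmpty then ['a'] else s
  -- step 6
  let s :=
    if s.length > 15 then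
      let s := PySem.Chars.slice s none (some 15)
      if PySem.Chars.endswith s ['.'] then PySem.Chars.slice s none (some (-1)) else s
    else s
  -- step 7 (s nonempty after step 5, so s[-1] is in range; getD is never the default)
  let s :=
    if s.length ≤ 2 then s ++ List.replicate (3 - s.length) ((PySem.List.pyGet? s (-1)).getD 'a')
    else s
  String.ofList s

-- ===== PRECONDITION & SPEC =====
def Spec_solution (new_id : String) (out : String) : Prop := out = solution_alt new_id
instance (new_id : String) (out : String) : Decidable (Spec_solution new_id out) := by unfold Spec_solution; infer_instance

-- ===== CLAIM (what is proved, stated in full; the proofs are below) =====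
def Claim_equal_solution : Prop := ∀ (new_id : String), Dom_solution new_id → Spec_solution new_id (solution new_id)

-- ===== LEMMAS AND PROOFS =====

-- ---- front (steps 1-2) ----

theorem pvLowerChar_cond (c : Char) :
    (if PySem.Chars.isupper c then PySem.Chars.lowerChar c else c) = PySem.Chars.lowerChar c := by
  by_cases h : PySem.Chars.isupper c = true <;> simp [h, PySem.Chars.lowerChar]

theorem pvSingleton_infix (c : Char) (l : List Char) : [c] <:+: l ↔ c ∈ l := by
  constructor
  · intro h; exact h.mem (by simp)
  · intro h
    obtain ⟨a, b, hb, -⟩ := List.eq_append_cons_of_mem h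
    exact ⟨a, b, by simpa using hb.symm⟩

theorem pvIsIn_singleton (c : Char) (l : List Char) : PySem.Chars.isIn [c] l = l.contains c := by
  by_cases h : c ∈ l
  · rw [(PySem.Chars.isIn_iff_infix [c] l).mpr ((pvSingleton_infix c l).mpr h)]
    simpa using h
  · have h2 : ¬ (PySem.Chars.isIn [c] l = true) := fun hh =>
      h ((pvSingleton_infix c l).mp ((PySem.Chars.isIn_iff_infix [c] l).mp hh))
    simp only [Bool.not_eq_true] at h2
    rw [h2]; symm; simpa using h

theorem pvFront_eq (cs : List Char) :
    (cs.map (fun c => if PySem.Chars.isupper c then PySem.Chars.lowerChar c else c)).foldl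
      (fun acc c =>
        if !PySem.Chars.isalpha c && !PySem.Chars.isdigit c && !((['-', '_', '.'] : List Char).contains c) then acc
        else acc ++ [c]) [] =
    (PySem.Chars.lower cs).filter (fun c =>
      PySem.Chars.isalpha c || PySem.Chars.isdigit c || PySem.Chars.isIn [c] ['-', '_', '.']) := by
  have hfun : (fun (acc : List Char) c =>
        if !PySem.Chars.isalpha c && !PySem.Chars.isdigit c && !((['-', '_', '.'] : List Char).contains c) then acc
        else acc ++ [c]) =
      (fun (acc : List Char) c =>
        if (PySem.Chars.isalpha c || PySem.Chars.isdigit c || PySem.Chars.isIn [c] ['-', '_', '.']) = true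
        then acc ++ [c] else acc) := by
    funext acc c
    simp only [pvIsIn_singleton]
    cases PySem.Chars.isalpha c <;> cases PySem.Chars.isdigit c <;>
      cases (['-', '_', '.'] : List Char).contains c <;> simp
  rw [hfun, PySem.List.foldl_append_if_eq_filter]
  have hmap : (fun c => if PySem.Chars.isupper c then PySem.Chars.lowerChar c else c) =
      PySem.Chars.lowerChar := funext pvLowerChar_cond
  simp [hmap, PySem.Chars.lower]

-- ---- step 3 as a recursion ----

def pvCollapse : Bool → List Char → List Char
  | _, [] => []
  | false, c :: t => if c = '.' then '.' :: pvCollapse true t else c :: pvCollapse false t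
  | true, c :: t => if c = '.' then pvCollapse true t else c :: pvCollapse false t

theorem pvFoldl3_eq (cs : List Char) (flag : Bool) (acc : List Char) :
    (cs.foldl pvStep3 (flag, acc)).2 = acc ++ pvCollapse flag cs := by
  induction cs generalizing flag acc with
  | nil => simp [pvCollapse]
  | cons c t ih =>
    rw [List.foldl_cons]
    cases flag
    · by_cases hc : c = '.'
      · rw [show pvStep3 (false, acc) c = (true, acc ++ ['.']) from by simp [pvStep3, hc], ih]
        simp [pvCollapse, hc]
      · rw [show pvStep3 (false, acc) c = (false, acc ++ [c]) from by simp [pvStep3, hc], ih]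
        simp [pvCollapse, hc]
    · by_cases hc : c = '.'
      · rw [show pvStep3 (true, acc) c = (true, acc) from by simp [pvStep3, hc], ih]
        simp [pvCollapse, hc]
      · rw [show pvStep3 (true, acc) c = (false, acc ++ [c]) from by simp [pvStep3, hc], ih]
        simp [pvCollapse, hc]

theorem pvCollapse_true (cs : List Char) :
    pvCollapse true cs = pvCollapse false (cs.dropWhile (· == '.')) := by
  induction cs with
  | nil => simp [pvCollapse]
  | cons c t ih =>
    by_cases hc : c = '.' <;> simp [pvCollapse, hc, List.dropWhile_cons, ih]

-- ---- split on '.' as a recursion, and the bridge to PySem.Chars.splitOn ----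

def pvSplitD : List Char → List (List Char)
  | [] => [[]]
  | c :: t =>
    if c = '.' then [] :: pvSplitD t
    else
      match pvSplitD t with
      | [] => [[c]]
      | p :: ps => (c :: p) :: ps

theorem pvSplitD_ne_nil (s : List Char) : pvSplitD s ≠ [] := by
  cases s with
  | nil => simp [pvSplitD]
  | cons c t =>
    unfold pvSplitD
    by_cases hc : c = '.'
    · simp [hc]
    · simp only [hc, if_false, reduceIte]
      cases pvSplitD t <;> simp

theorem pvSplitD_cons (t : List Char) : ∃ p ps, pvSplitD t = p :: ps := by
  cases hh : pvSplitD t with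
  | nil => exact absurd hh (pvSplitD_ne_nil t)
  | cons p ps => exact ⟨p, ps, rfl⟩

theorem pvGo_zero (l cur : List Char) (acc : List (List Char)) :
    PySem.Chars.splitOn.go ['.'] 0 l cur acc = ((cur.reverse ++ l) :: acc).reverse := by
  rw [PySem.Chars.splitOn.go]

theorem pvGo_nil (fuel : Nat) (cur : List Char) (acc : List (List Char)) :
    PySem.Chars.splitOn.go ['.'] (fuel + 1) [] cur acc = (cur.reverse :: acc).reverse := by
  rw [PySem.Chars.splitOn.go]
  exact fun h => absurd h (Nat.succ_ne_zero fuel)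

theorem pvGo_dot (fuel : Nat) (rest cur : List Char) (acc : List (List Char)) :
    PySem.Chars.splitOn.go ['.'] (fuel + 1) ('.' :: rest) cur acc =
      PySem.Chars.splitOn.go ['.'] fuel rest [] (cur.reverse :: acc) := by
  rw [PySem.Chars.splitOn.go]
  simp [List.isPrefixOf]

theorem pvGo_ne (fuel : Nat) (c : Char) (rest cur : List Char) (acc : List (List Char))
    (h : c ≠ '.') :
    PySem.Chars.splitOn.go ['.'] (fuel + 1) (c :: rest) cur acc =
      PySem.Chars.splitOn.go ['.'] fuel rest (c :: cur) acc := by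
  rw [PySem.Chars.splitOn.go]
  simp [List.isPrefixOf, Ne.symm h]

theorem pvSplitOn_go_eq : ∀ (fuel : Nat) (s cur : List Char) (acc : List (List Char)),
    s.length ≤ fuel →
    PySem.Chars.splitOn.go ['.'] fuel s cur acc =
      acc.reverse ++ (pvSplitD s).modifyHead (fun p => cur.reverse ++ p) := by
  intro fuel
  induction fuel with
  | zero =>
    intro s cur acc hs
    have hnil : s = [] := by
      cases s with
      | nil => rfl
      | cons a b => simp at hs
    subst hnil
    rw [pvGo_zero]
    simp [pvSplitD]
  | succ n ih =>
    intro s cur acc hs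
    cases s with
    | nil =>
      rw [pvGo_nil]
      simp [pvSplitD]
    | cons c rest =>
      by_cases hc : c = '.'
      · subst hc
        rw [pvGo_dot, ih rest [] (cur.reverse :: acc) (by simpa using hs)]
        obtain ⟨p, ps, hps⟩ := pvSplitD_cons rest
        simp [pvSplitD, hps]
      · rw [pvGo_ne n c rest cur acc hc, ih rest (c :: cur) acc (by simpa using hs)]
        obtain ⟨p, ps, hps⟩ := pvSplitD_cons rest
        simp [pvSplitD, hc, hps]

theorem pvSplitOn_eq (s : List Char) : PySem.Chars.splitOn s ['.'] = pvSplitD s := by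
  unfold PySem.Chars.splitOn
  rw [pvSplitOn_go_eq (s.length + 1) s [] [] (by omega)]
  obtain ⟨p, ps, hps⟩ := pvSplitD_cons s
  simp [hps]

-- ---- the joined normal form and A's steps 3-4 against it ----

def pvW (s : List Char) : List (List Char) := (pvSplitD s).filter (fun p => !p.isEmpty)

def pvT (s : List Char) : List Char := PySem.Chars.join ['.'] (pvW s)

def pvU : List Char → List Char
  | [] => []
  | c :: t => if c = '.' then (if pvW t = [] then [] else '.' :: pvT t) else c :: pvU t

def pvDropTrail (l : List Char) : List Char :=
  if l.getLast? = some '.' then l.dropLast else l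

def pvDropLead (l : List Char) : List Char :=
  if l.head? = some '.' then l.tail else l

theorem pvW_dot (t : List Char) : pvW ('.' :: t) = pvW t := by
  simp [pvW, pvSplitD]

theorem pvT_dot (t : List Char) : pvT ('.' :: t) = pvT t := by
  simp [pvT, pvW_dot]

theorem pvU_eq (t : List Char) :
    pvU t =
      match pvSplitD t with
      | [] => []
      | p :: ps =>
        p ++ (if ps.filter (fun p => !p.isEmpty) = [] then []
              else '.' :: PySem.Chars.join ['.'] (ps.filter (fun p => !p.isEmpty))) := by
  induction t with
  | nil => simp [pvU, pvSplitD]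
  | cons c t ih =>
    by_cases hc : c = '.'
    · subst hc
      simp only [pvU, if_true, reduceIte, pvSplitD]
      rfl
    · obtain ⟨p, ps, hps⟩ := pvSplitD_cons t
      simp only [pvU, hc, if_false, reduceIte, pvSplitD, hps, ih]
      simp

theorem pvT_cons (c : Char) (t : List Char) (hc : c ≠ '.') :
    pvT (c :: t) = c :: pvU t := by
  obtain ⟨p, ps, hps⟩ := pvSplitD_cons t
  have hsplit : pvSplitD (c :: t) = (c :: p) :: ps := by
    simp [pvSplitD, hc, hps]
  rw [pvT, pvW, hsplit, pvU_eq, hps]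
  cases hf : ps.filter (fun p => !p.isEmpty) with
  | nil => simp [hf, PySem.Chars.join_singleton]
  | cons q qs => simp [hf, PySem.Chars.join_cons_cons]

theorem pvT_dropWhile (t : List Char) :
    pvT (t.dropWhile (· == '.')) = pvT t ∧ pvW (t.dropWhile (· == '.')) = pvW t := by
  induction t with
  | nil => simp
  | cons c t ih =>
    by_cases hc : c = '.'
    · subst hc
      simpa [List.dropWhile_cons, pvT_dot, pvW_dot] using ih
    · simp [List.dropWhile_cons, hc]

theorem pvDropWhile_head_ne (t : List Char) (d : Char) (u : List Char)
    (h : t.dropWhile (· == '.') = d :: u) : d ≠ '.' := by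
  induction t with
  | nil => simp at h
  | cons c t ih =>
    rw [List.dropWhile_cons] at h
    by_cases hc : c = '.'
    · exact ih (by simpa [hc] using h)
    · have hcc : (c == '.') = false := by simpa using hc
      rw [hcc] at h
      simp only [Bool.false_eq_true, if_false] at h
      rw [List.cons.injEq] at h
      rw [← h.1]
      exact hc

theorem pvDropTrail_cons (c : Char) (X : List Char) (h : X ≠ []) :
    pvDropTrail (c :: X) = c :: pvDropTrail X := by
  obtain ⟨x, xs, rfl⟩ := List.exists_cons_of_ne_nil h
  by_cases hl : (x :: xs).getLast? = some '.'
  · simp [pvDropTrail, List.getLast?_cons_cons, hl]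
  · simp [pvDropTrail, List.getLast?_cons_cons, hl]

theorem pvCollapse_ne_nil (d : Char) (u : List Char) : pvCollapse false (d :: u) ≠ [] := by
  by_cases hd : d = '.' <;> simp [pvCollapse, hd]

theorem pvMid_aux : ∀ (n : Nat) (s : List Char), s.length ≤ n →
    pvDropTrail (pvCollapse false s) = pvU s := by
  intro n
  induction n with
  | zero =>
    intro s hs
    have hnil : s = [] := by
      cases s with
      | nil => rfl
      | cons a b => simp at hs
    subst hnil
    simp [pvCollapse, pvU, pvDropTrail]
  | succ n ih =>
    intro s hs
    cases s with
    | nil => simp [pvCollapse, pvU, pvDropTrail]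
    | cons c t =>
      simp only [List.length_cons, Nat.succ_le_succ_iff] at hs
      by_cases hc : c = '.'
      · subst hc
        rw [show pvCollapse false ('.' :: t) = '.' :: pvCollapse false (t.dropWhile (· == '.')) from by
              simp [pvCollapse, pvCollapse_true]]
        have hT := pvT_dropWhile t
        cases ht' : t.dropWhile (· == '.') with
        | nil =>
          rw [ht'] at hT
          have hW : pvW t = [] := by rw [← hT.2]; simp [pvW, pvSplitD]
          simp [pvCollapse, pvDropTrail, pvU, hW]
        | cons d u =>
          rw [ht'] at hT
          have hd : d ≠ '.' := pvDropWhile_head_ne t d u ht'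
          have hlen : (d :: u).length ≤ n := by
            have h1 := List.length_dropWhile_le (· == '.') t
            rw [ht'] at h1
            omega
          rw [pvDropTrail_cons _ _ (pvCollapse_ne_nil d u), ih (d :: u) hlen]
          have hWdu : pvW (d :: u) ≠ [] := by
            obtain ⟨p, ps, hps⟩ := pvSplitD_cons u
            simp [pvW, pvSplitD, hd, hps]
          have hWt : ¬ (pvW t = []) := by rw [← hT.2]; exact hWdu
          have hUT : pvU (d :: u) = pvT (d :: u) := by
            rw [pvT_cons d u hd]; simp [pvU, hd]
          rw [show pvU ('.' :: t) = if pvW t = [] then [] else '.' :: pvT t from by simp [pvU]]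
          rw [if_neg hWt, hUT, hT.1]
      · have hIH := ih t hs
        rw [show pvCollapse false (c :: t) = c :: pvCollapse false t from by simp [pvCollapse, hc]]
        rw [show pvU (c :: t) = c :: pvU t from by simp [pvU, hc]]
        cases hX : pvCollapse false t with
        | nil =>
          have hU : pvU t = [] := by rw [← hIH, hX]; simp [pvDropTrail]
          rw [hU]
          simp [pvDropTrail, hc]
        | cons x xs =>
          rw [pvDropTrail_cons c (x :: xs) (by simp)]
          rw [hX] at hIH
          rw [hIH]

theorem pvMid (s : List Char) : pvDropTrail (pvCollapse false s) = pvU s :=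
  pvMid_aux s.length s le_rfl

-- ---- A's step 4 is dropTrail ∘ dropLead ----

theorem pvGet0 (l : List Char) : PySem.List.pyGet? l 0 = l.head? := by
  simp [pysem, List.head?_eq_getElem?]

theorem pvGetNeg1 (l : List Char) : PySem.List.pyGet? l (-1) = l.getLast? := by
  simp [pysem]

theorem pvA4_eq (l : List Char) :
    (if l.length > 1 then
      if PySem.List.pyGet? l 0 = some '.' ∧ PySem.List.pyGet? l (-1) = some '.' then
        PySem.List.slice l (some 1) (some ((l.length : Int) - 1))
      else if PySem.List.pyGet? l 0 = some '.' then
        PySem.List.slice l (some 1) (some (l.length : Int))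
      else if PySem.List.pyGet? l (-1) = some '.' then
        PySem.List.slice l none (some ((l.length : Int) - 1))
      else l
    else if l.length = 1 ∧ PySem.List.pyGet? l 0 = some '.' then []
    else l) = pvDropTrail (pvDropLead l) := by
  rw [pvGet0, pvGetNeg1]
  cases l with
  | nil => simp [pvDropTrail, pvDropLead]
  | cons c t =>
    cases t with
    | nil =>
      by_cases hc : c = '.'
      · subst hc; simp [pvDropLead, pvDropTrail]
      · simp [pvDropLead, pvDropTrail, hc]
    | cons b u =>
      have h2 : (c :: b :: u).length > 1 := by simp
      rw [if_pos h2]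
      have hlast : (c :: b :: u).getLast? = (b :: u).getLast? := List.getLast?_cons_cons
      have hone : (1 : Int) = ((1 : Nat) : Int) := rfl
      have hsub : (((c :: b :: u).length : Int) - 1) = (((b :: u).length : Nat) : Int) := by
        simp
      by_cases h0 : c = '.' <;> by_cases h1 : (b :: u).getLast? = some '.'
      · rw [if_pos ⟨by simp [h0], by rw [hlast]; exact h1⟩]
        rw [hsub, hone, PySem.List.slice_natCast]
        rw [pvDropLead, if_pos (by simp [h0]), pvDropTrail, List.tail_cons, if_pos h1]
        rw [List.dropLast_eq_take]
        simp
      · rw [if_neg (by rw [hlast]; exact fun hh => h1 hh.2), if_pos (by simp [h0])]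
        rw [hone, PySem.List.slice_natCast]
        rw [pvDropLead, if_pos (by simp [h0]), pvDropTrail, List.tail_cons, if_neg h1]
        simp
      · rw [if_neg (fun hh => h0 (by simpa using hh.1)), if_neg (fun hh => h0 (by simpa using hh)),
          if_pos (by rw [hlast]; exact h1)]
        rw [hsub, PySem.List.slice_to _ (by positivity)]
        rw [pvDropLead, if_neg (by simpa using h0), pvDropTrail, if_pos (by rw [hlast]; exact h1)]
        rw [List.dropLast_eq_take]
        simp
      · rw [if_neg (fun hh => h0 (by simpa using hh.1)), if_neg (fun hh => h0 (by simpa using hh)),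
          if_neg (by rw [hlast]; exact h1)]
        rw [pvDropLead, if_neg (by simpa using h0), pvDropTrail, if_neg (by rw [hlast]; exact h1)]

-- ---- the mid chain: A's steps 3+4 equal B's split/filter/join ----

theorem pvMidChain (s : List Char) :
    pvDropTrail (pvDropLead (pvCollapse false s)) =
      PySem.Chars.join ['.'] ((pvSplitD s).filter (fun p => !p.isEmpty)) := by
  show pvDropTrail (pvDropLead (pvCollapse false s)) = pvT s
  cases s with
  | nil => simp [pvCollapse, pvDropLead, pvDropTrail, pvT, pvW, pvSplitD, PySem.Chars.join_nil]
  | cons c t =>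
    by_cases hc : c = '.'
    · subst hc
      rw [show pvCollapse false ('.' :: t) = '.' :: pvCollapse false (t.dropWhile (· == '.')) from by
            simp [pvCollapse, pvCollapse_true]]
      rw [show pvDropLead ('.' :: pvCollapse false (t.dropWhile (· == '.'))) =
            pvCollapse false (t.dropWhile (· == '.')) from by simp [pvDropLead]]
      rw [pvMid (t.dropWhile (· == '.'))]
      have hT := pvT_dropWhile t
      rw [pvT_dot]
      cases ht' : t.dropWhile (· == '.') with
      | nil =>
        rw [ht'] at hT
        rw [show pvU ([] : List Char) = [] from rfl, ← hT.1]
        simp [pvT, pvW, pvSplitD, PySem.Chars.join_nil]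
      | cons d u =>
        rw [ht'] at hT
        have hd : d ≠ '.' := pvDropWhile_head_ne t d u ht'
        have hUT : pvU (d :: u) = pvT (d :: u) := by
          rw [pvT_cons d u hd]; simp [pvU, hd]
        rw [hUT, hT.1]
    · rw [show pvDropLead (pvCollapse false (c :: t)) = pvCollapse false (c :: t) from by
            simp [pvCollapse, hc, pvDropLead]]
      rw [pvMid (c :: t), pvT_cons c t hc]
      simp [pvU, hc]

-- ---- tail (steps 5-7) ----

theorem pvEndswith_dot (l : List Char) :
    (PySem.Chars.endswith l ['.'] = true) ↔ l.getLast? = some '.' := by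
  rw [PySem.Chars.endswith_iff]
  constructor
  · rintro ⟨t, rfl⟩; exact List.getLast?_concat
  · intro h
    obtain ⟨ys, rfl⟩ := List.getLast?_eq_some_iff.mp h
    exact ⟨ys, rfl⟩

theorem pvTail5_eq (m : List Char) :
    (if m.length = 0 then m ++ ['a'] else m) = (if m.isEmpty then ['a'] else m) := by
  cases m <;> simp

theorem pvTail6_eq (m : List Char) :
    (if m.length > 15 then
       if PySem.List.pyGet? (PySem.List.slice m none (some 15)) (-1) = some '.' then
         (PySem.List.slice m none (some 15)).dropLast
       else PySem.List.slice m none (some 15)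
     else m) =
    (if m.length > 15 then
       if PySem.Chars.endswith (PySem.Chars.slice m none (some 15)) ['.'] then
         PySem.Chars.slice (PySem.Chars.slice m none (some 15)) none (some (-1))
       else PySem.Chars.slice m none (some 15)
     else m) := by
  by_cases h : m.length > 15
  · rw [if_pos h, if_pos h]
    simp only [PySem.Chars.slice_eq_listSlice]
    rw [pvGetNeg1]
    by_cases hl : (PySem.List.slice m none (some 15)).getLast? = some '.'
    · rw [if_pos hl, if_pos ((pvEndswith_dot _).mpr hl)]
      simp [pysem]
    · rw [if_neg hl, if_neg (fun hh => hl ((pvEndswith_dot _).mp hh))]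
  · rw [if_neg h, if_neg h]

theorem pvMapConstReplicate (n : Nat) (c : Char) :
    (List.range n).map (fun _ => c) = List.replicate n c := by
  induction n with
  | zero => simp
  | succ k ih => simp [List.range_succ, List.replicate_succ', ih]

theorem pvTail7_eq (m : List Char) :
    (if m.length ≤ 2 then
       m ++ (PySem.List.pyRange 0 (3 - (m.length : Int)) 1).map
         (fun _ => (PySem.List.pyGet? m (-1)).getD 'a')
     else m) =
    (if m.length ≤ 2 then
       m ++ List.replicate (3 - m.length) ((PySem.List.pyGet? m (-1)).getD 'a')
     else m) := by
  by_cases h : m.length ≤ 2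
  · rw [if_pos h, if_pos h]
    congr 1
    rw [show (3 - (m.length : Int)) = ((3 - m.length : Nat) : Int) from by omega]
    rw [PySem.List.pyRange_zero_natCast, List.map_map]
    rw [show ((fun (_ : Int) => (PySem.List.pyGet? m (-1)).getD 'a') ∘ (fun (k : Nat) => (k : Int)))
          = (fun (_ : Nat) => (PySem.List.pyGet? m (-1)).getD 'a') from rfl]
    rw [pvMapConstReplicate]
  · rw [if_neg h, if_neg h]

-- ===== VERDICT (by name: the statement is the Claim_ definition above) =====
theorem solution_spec : Claim_equal_solution := by
  intro new_id _
  unfold Spec_solution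
  simp only [solution, solution_alt]
  rw [pvFront_eq, pvFoldl3_eq, List.nil_append, pvA4_eq, pvMidChain, pvSplitOn_eq,
    pvTail5_eq, pvTail6_eq, pvTail7_eq]
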